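-- pv_equiv track=rewrite | github.com/jasontan656/Otctopus_OS_AgentConsole | 7-Task-runtime-selfcheck/scripts/runtime_pain_repair_exec.py | _extract_positional_targets
-- ===== SOURCE A (Python) =====
-- def _extract_positional_targets(tokens: list[str]) -> list[str]:
--     if len(tokens) <= 1:
--         return []
--
--     targets: list[str] = []
--     options_ended = False
--     for token in tokens[1:]:
--         value = str(token or "").strip()
--         if not value:
--             continue
--         if value == "--" and not options_ended:
--             options_ended = True
--             continue
--         if not options_ended and value.startswith("-"):
--             continue
--         targets.append(value)
--     return targets
-- ===== SOURCE B (Python) =====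
-- def _extract_positional_targets(tokens: list[str]) -> list[str]:
--     cleaned = [v for v in (str(t or "").strip() for t in tokens[1:]) if v]
--     if "--" in cleaned:
--         i = cleaned.index("--")
--         return [v for v in cleaned[:i] if not v.startswith("-")] + cleaned[i + 1:]
--     return [v for v in cleaned if not v.startswith("-")]
-- ===== Notes on version B (the rewrite author's own statement) =====
-- stated objective: simpler
-- what changed: Replaces the single stateful loop with an options_ended flag by a normalize-then-split decomposition: build the cleaned list once, split it at the first '--', filter '-'-prefixed entries only in the prefix and keep the suffix verbatim.
import Mathlib
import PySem

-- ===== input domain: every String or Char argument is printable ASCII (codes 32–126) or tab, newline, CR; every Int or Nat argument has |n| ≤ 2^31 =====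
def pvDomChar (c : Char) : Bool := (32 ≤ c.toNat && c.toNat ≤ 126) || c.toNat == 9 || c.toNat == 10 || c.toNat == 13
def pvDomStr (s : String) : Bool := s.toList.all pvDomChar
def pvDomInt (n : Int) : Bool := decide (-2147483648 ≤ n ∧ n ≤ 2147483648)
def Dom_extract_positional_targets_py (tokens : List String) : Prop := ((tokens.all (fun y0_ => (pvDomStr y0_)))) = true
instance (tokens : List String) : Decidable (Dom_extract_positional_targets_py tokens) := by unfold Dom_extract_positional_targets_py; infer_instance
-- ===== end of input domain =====

-- B replaces A's stateful loop-with-flag by a normalize-then-split-at-first-'--' decomposition (objective: simpler).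

-- ===== PORT A =====
-- value = str(token or "").strip()  (token is a str, so 'token or ""' is token unless empty)
def pvVal (t : String) : String := PySem.Str.strip (if t = "" then "" else t)

-- the loop body of A over state (targets, options_ended)
def pvStepA (st : List String × Bool) (token : String) : List String × Bool :=
  let value := pvVal token
  if value = "" then st
  else if value = "--" ∧ st.2 = false then (st.1, true)
  else if st.2 = false ∧ PySem.Str.startswith value "-" = true then st
  else (st.1 ++ [value], st.2)

def extract_positional_targets_py (tokens : List String) : List String :=
  if tokens.length ≤ 1 then []
  else ((tokens.drop 1).foldl pvStepA ([], false)).1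

-- ===== PORT B =====
-- cleaned = [v for v in (str(t or "").strip() for t in tokens[1:]) if v]
def pvClean (l : List String) : List String := (l.map pvVal).filter (fun v => v ≠ "")

-- split the cleaned list at the first "--": filter '-'-options before it, keep the suffix verbatim
def pvSplit (c : List String) : List String :=
  if c.contains "--" then
    let i := (PySem.List.index? c "--").getD 0
    (c.take i).filter (fun v => !(PySem.Str.startswith v "-")) ++ c.drop (i + 1)
  else c.filter (fun v => !(PySem.Str.startswith v "-"))

def extract_positional_targets_py_alt (tokens : List String) : List String :=
  pvSplit (pvClean (tokens.drop 1))

-- ===== PRECONDITION & SPEC =====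
def Spec_extract_positional_targets_py (tokens : List String) (out : List String) : Prop := out = extract_positional_targets_py_alt tokens
instance (tokens : List String) (out : List String) : Decidable (Spec_extract_positional_targets_py tokens out) := by unfold Spec_extract_positional_targets_py; infer_instance

-- ===== CLAIM (what is proved, stated in full; the proofs are below) =====
def Claim_equal_extract_positional_targets_py : Prop := ∀ (tokens : List String), Dom_extract_positional_targets_py tokens → Spec_extract_positional_targets_py tokens (extract_positional_targets_py tokens)

-- ===== LEMMAS AND PROOFS =====

theorem pvSplit_nil : pvSplit [] = [] := by decide

theorem pvSplit_dashdash (c : List String) : pvSplit ("--" :: c) = c := by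
  have h : PySem.List.index? ("--" :: c) "--" = some 0 :=
    PySem.List.index?_cons_self _ _
  have hc : (("--" :: c).contains "--") = true := by simp
  simp only [pvSplit, hc, if_true, h, Option.getD_some, List.take_zero,
    List.filter_nil, List.drop_succ_cons, List.drop_zero, List.nil_append]

theorem pvSplit_cons (v : String) (c : List String) (hne : v ≠ "--") :
    pvSplit (v :: c) =
      (if PySem.Chars.startswith v.toList ['-'] = true then [] else [v]) ++ pvSplit c := by
  rcases hidx : PySem.List.index? c "--" with _ | i
  · have hm : c.contains "--" = false := by
      simp [(PySem.List.index?_eq_none_iff c "--").mp hidx]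
    have hm' : ((v :: c).contains "--") = false := by
      have hne' : ¬ ("--" = v) := fun h => hne h.symm
      simp [hne', (PySem.List.index?_eq_none_iff c "--").mp hidx]
    simp only [pvSplit, hm, hm', Bool.false_eq_true, if_false, List.filter_cons]
    by_cases hs : PySem.Chars.startswith v.toList ['-'] = true <;> simp [hs]
  · have hmemc : "--" ∈ c := by
      by_contra hno
      rw [(PySem.List.index?_eq_none_iff c "--").mpr hno] at hidx; cases hidx
    have hm : c.contains "--" = true := by simpa using hmemc
    have hm' : ((v :: c).contains "--") = true := by simp [hmemc]
    have h2 : PySem.List.index? (v :: c) "--" = some (i + 1) := by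
      rw [PySem.List.index?_cons_of_ne _ hne, hidx]; rfl
    simp only [pvSplit, hm, hm', if_true, h2, hidx, Option.getD_some,
      List.take_succ_cons, List.drop_succ_cons, List.filter_cons]
    by_cases hs : PySem.Chars.startswith v.toList ['-'] = true <;> simp [hs]

theorem pvClean_cons (t : String) (l : List String) :
    pvClean (t :: l) = if pvVal t = "" then pvClean l else pvVal t :: pvClean l := by
  by_cases h : pvVal t = "" <;> simp [pvClean, h]

theorem foldl_true (l : List String) (acc : List String) :
    (l.foldl pvStepA (acc, true)).1 = acc ++ pvClean l := by
  induction l generalizing acc with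
  | nil => simp [pvClean]
  | cons t l ih =>
    rw [List.foldl_cons, pvClean_cons]
    by_cases h : pvVal t = ""
    · have hst : pvStepA (acc, true) t = (acc, true) := by simp [pvStepA, h]
      rw [hst, ih]; simp [h]
    · have hst : pvStepA (acc, true) t = (acc ++ [pvVal t], true) := by
        simp [pvStepA, h]
      rw [hst, ih]; simp [h]

theorem foldl_false (l : List String) (acc : List String) :
    (l.foldl pvStepA (acc, false)).1 = acc ++ pvSplit (pvClean l) := by
  induction l generalizing acc with
  | nil => simp [pvClean, pvSplit_nil]
  | cons t l ih =>
    rw [List.foldl_cons, pvClean_cons]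
    by_cases h0 : pvVal t = ""
    · have hst : pvStepA (acc, false) t = (acc, false) := by simp [pvStepA, h0]
      rw [hst, ih]; simp [h0]
    · by_cases h1 : pvVal t = "--"
      · have hst : pvStepA (acc, false) t = (acc, true) := by simp [pvStepA, h1]
        rw [hst, foldl_true]
        simp [h1, pvSplit_dashdash]
      · by_cases h2 : PySem.Chars.startswith (pvVal t).toList ['-'] = true
        · have hst : pvStepA (acc, false) t = (acc, false) := by
            simp [pvStepA, h0, h1, h2]
          rw [hst, ih]
          simp [h0, pvSplit_cons _ _ h1, h2]
        · have hst : pvStepA (acc, false) t = (acc ++ [pvVal t], false) := by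
            simp [pvStepA, h0, h1, h2]
          rw [hst, ih]
          simp [h0, pvSplit_cons _ _ h1, h2]

-- ===== VERDICT (by name: the statement is the Claim_ definition above) =====
theorem extract_positional_targets_py_spec : Claim_equal_extract_positional_targets_py := by
  intro tokens _
  unfold Spec_extract_positional_targets_py extract_positional_targets_py extract_positional_targets_py_alt
  by_cases h : tokens.length ≤ 1
  · have : tokens.drop 1 = [] := by
      apply List.drop_eq_nil_of_le; omega
    simp [h, this, pvClean, pvSplit_nil]
  · simp only [h, if_false]
    simpa using foldl_false (tokens.drop 1) []
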